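-- pv_equiv track=rewrite | github.com/himkt/problems.2022 | atcoder/arc127/test.py | compute_bruteforce
-- ===== SOURCE A (Python) =====
-- def compute_bruteforce(n):
--     score = 0
--
--     for k in range(1, n + 1):
--         s = str(k)
--         c = 0
--         for si in s:
--             if si == '1':
--                 c += 1
--             else:
--                 break
--         score += c
--
--     return score
-- ===== SOURCE B (Python) =====
-- def compute_bruteforce(n):
--     if n < 1:
--         return 0
--     # L = number of decimal digits of n
--     L, t = 0, n
--     while t > 0:
--         L += 1
--         t //= 10
--     total = 0
--     for m in range(1, L + 1):          # prefix '1' * m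
--         rep = (10 ** m - 1) // 9       # the repunit 11...1 (m ones)
--         for d in range(m, L + 1):      # total digit count d
--             w = 10 ** (d - m)
--             lo = rep * w               # smallest d-digit number starting with m ones
--             if lo <= n:
--                 total += min(lo + w - 1, n) - lo + 1
--     return total
-- ===== Notes on version B (the rewrite author's own statement) =====
-- stated objective: faster
-- what changed: Instead of scanning the decimal string of every k in 1..n, B counts for each prefix length m and digit count d the integers <= n whose decimal expansion starts with m ones, via closed-form arithmetic intervals [repunit(m)*10^(d-m), repunit(m)*10^(d-m)+10^(d-m)-1].
import Mathlib
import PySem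

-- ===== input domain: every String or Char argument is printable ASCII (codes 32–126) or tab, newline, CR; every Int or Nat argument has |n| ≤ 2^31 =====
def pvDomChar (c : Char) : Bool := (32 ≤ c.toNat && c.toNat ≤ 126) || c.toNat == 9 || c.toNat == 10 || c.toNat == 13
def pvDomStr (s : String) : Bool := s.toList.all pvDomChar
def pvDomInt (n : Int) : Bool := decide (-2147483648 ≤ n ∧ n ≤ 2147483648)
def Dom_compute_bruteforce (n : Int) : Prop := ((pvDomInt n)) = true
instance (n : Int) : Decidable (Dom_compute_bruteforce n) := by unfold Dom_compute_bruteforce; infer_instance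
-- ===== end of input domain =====

-- B replaces A's per-integer string scan over 1..n by counting, for each prefix length m and
-- digit count d, the integers ≤ n whose decimal expansion starts with m ones (closed-form
-- arithmetic intervals); a timing run measured B faster (asymptotic: O(log^2 n) vs O(n log n)).

-- ===== PORT A =====
def pyCntOnes : List Char → Int
  | [] => 0
  | c :: cs => if c = '1' then pyCntOnes cs + 1 else 0

def compute_bruteforce (n : Int) : Int :=
  (PySem.List.pyRange 1 (n + 1) 1).foldl
    (fun score k => score + pyCntOnes (PySem.Int.toChars k)) 0

-- ===== PORT B =====
def altLen (t : Int) : Int :=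
  if h : 0 < t then altLen (PySem.Int.floordiv t 10) + 1 else 0
termination_by t.toNat
decreasing_by
  have h10 : PySem.Int.floordiv t 10 = t / 10 := PySem.Int.floordiv_eq_ediv_of_pos (by omega)
  rw [h10]; omega

def compute_bruteforce_alt (n : Int) : Int :=
  if n < 1 then 0
  else
    let L := altLen n
    (PySem.List.pyRange 1 (L + 1) 1).foldl (fun total m =>
      let rep := PySem.Int.floordiv (10 ^ m.toNat - 1) 9
      (PySem.List.pyRange m (L + 1) 1).foldl (fun total d =>
        let w : Int := 10 ^ (d - m).toNat
        let lo := rep * w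
        if lo ≤ n then total + (min (lo + w - 1) n - lo + 1) else total) total) 0

-- ===== PRECONDITION & SPEC =====
def Spec_compute_bruteforce (n : Int) (out : Int) : Prop := out = compute_bruteforce_alt n
instance (n : Int) (out : Int) : Decidable (Spec_compute_bruteforce n out) := by unfold Spec_compute_bruteforce; infer_instance

-- ===== CLAIM =====
def Claim_equal_compute_bruteforce : Prop := ∀ (n : Int), Dom_compute_bruteforce n → Spec_compute_bruteforce n (compute_bruteforce n)

-- ===== LEMMAS AND PROOFS =====

-- number of decimal digits of k (1 for k = 0)
def nlen (k : Nat) : Nat :=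
  if k < 10 then 1 else nlen (k / 10) + 1
decreasing_by omega

-- the decimal digit characters of k, most significant first
def digs (k : Nat) : List Char :=
  if k < 10 then [Nat.digitChar k] else digs (k / 10) ++ [Nat.digitChar (k % 10)]
decreasing_by omega

-- number of leading '1' digits of k
def lead (k : Nat) : Nat :=
  if k < 10 then (if k = 1 then 1 else 0)
  else if lead (k / 10) = nlen (k / 10) ∧ k % 10 = 1 then nlen (k / 10) + 1 else lead (k / 10)
decreasing_by omega

-- the repunit 11…1 with m ones
def rpu : Nat → Nat
  | 0 => 0
  | m + 1 => 10 * rpu m + 1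

def cntN : List Char → Nat
  | [] => 0
  | c :: cs => if c = '1' then cntN cs + 1 else 0

theorem pyCntOnes_eq (cs : List Char) : pyCntOnes cs = (cntN cs : Int) := by
  induction cs with
  | nil => rfl
  | cons c cs ih => simp [pyCntOnes, cntN]; split <;> simp [ih]

theorem toDigitsCore_digs (k : Nat) : ∀ fuel ds, k < fuel →
    Nat.toDigitsCore 10 fuel k ds = digs k ++ ds := by
  induction k using Nat.strong_induction_on with
  | _ k ih =>
    intro fuel ds hf
    match fuel with
    | fuel + 1 =>
      rw [Nat.toDigitsCore]
      by_cases h : k / 10 = 0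
      · simp only [h]
        rw [digs]
        have : k < 10 := by omega
        simp [this, Nat.mod_eq_of_lt this]
      · simp only [h]
        rw [ih (k / 10) (by omega) fuel _ (by omega)]
        conv_rhs => rw [digs]
        have hk : ¬ k < 10 := by omega
        rw [if_neg hk, List.append_assoc]
        rfl

theorem toChars_nonneg (k : Int) (h : 0 ≤ k) : PySem.Int.toChars k = digs k.toNat := by
  rw [PySem.Int.toChars]
  rw [if_neg (by omega)]
  rw [Nat.toDigits, toDigitsCore_digs _ _ _ (by omega), List.append_nil]

theorem length_digs (k : Nat) : (digs k).length = nlen k := by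
  induction k using Nat.strong_induction_on with
  | _ k ih =>
    rw [digs, nlen]
    by_cases h : k < 10 <;> simp [h]
    rw [ih (k / 10) (by omega)]

theorem cntN_le_length (cs : List Char) : cntN cs ≤ cs.length := by
  induction cs with
  | nil => simp [cntN]
  | cons c cs ih => rw [cntN]; split <;> simp <;> omega

theorem cntN_append (xs : List Char) (c : Char) :
    cntN (xs ++ [c]) = if cntN xs = xs.length then cntN xs + (if c = '1' then 1 else 0) else cntN xs := by
  induction xs with
  | nil => simp [cntN]
  | cons x xs ih =>
    simp only [List.cons_append, cntN, List.length_cons]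
    by_cases hx : x = '1'
    · simp only [hx, ih]
      have := cntN_le_length xs
      by_cases h : cntN xs = xs.length <;> simp [h] <;> omega
    · have h2 : ¬ (0 = xs.length + 1) := by omega
      simp [hx]

theorem digitChar_one_iff (k : Nat) (h : k < 10) : Nat.digitChar k = '1' ↔ k = 1 := by
  interval_cases k <;> simp [Nat.digitChar]

theorem cntN_digs (k : Nat) : cntN (digs k) = lead k := by
  induction k using Nat.strong_induction_on with
  | _ k ih =>
    rw [digs, lead]
    by_cases h : k < 10
    · rw [if_pos h, if_pos h]
      simp only [cntN]
      by_cases h1 : Nat.digitChar k = '1'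
      · rw [if_pos h1, if_pos ((digitChar_one_iff k h).mp h1)]
      · rw [if_neg h1, if_neg (fun hk => h1 ((digitChar_one_iff k h).mpr hk))]
    · rw [if_neg h, if_neg h]
      rw [cntN_append, ih (k / 10) (by omega), length_digs]
      have hmod : k % 10 < 10 := by omega
      by_cases hl : lead (k / 10) = nlen (k / 10)
      · simp only [hl]
        by_cases h1 : k % 10 = 1
        · rw [if_pos ((digitChar_one_iff _ hmod).mpr h1)]
          simp [h1]
        · rw [if_neg (fun hc => h1 ((digitChar_one_iff _ hmod).mp hc))]
          simp [h1, hl]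
      · have : ¬ (lead (k / 10) = nlen (k / 10) ∧ k % 10 = 1) := fun ⟨a, _⟩ => hl a
        simp [hl, this]

theorem nlen_pos (k : Nat) : 1 ≤ nlen k := by
  rw [nlen]; split <;> omega

theorem nlen_spec (k : Nat) (h : 1 ≤ k) : 10 ^ (nlen k - 1) ≤ k ∧ k < 10 ^ nlen k := by
  induction k using Nat.strong_induction_on with
  | _ k ih =>
    rw [nlen]
    by_cases hk : k < 10
    · simp [hk]; omega
    · simp only [hk, if_neg hk]
      obtain ⟨h1, h2⟩ := ih (k / 10) (by omega) (by omega)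
      have hp := nlen_pos (k / 10)
      constructor
      · calc 10 ^ (nlen (k/10) + 1 - 1) = 10 * 10 ^ (nlen (k/10) - 1) := by
              rw [← pow_succ']; congr 1; omega
          _ ≤ 10 * (k / 10) := by omega
          _ ≤ k := by omega
      · calc k < 10 * (k / 10) + 10 := by omega
          _ ≤ 10 * 10 ^ (nlen (k/10)) := by
              have : k / 10 + 1 ≤ 10 ^ (nlen (k/10)) := by omega
              omega
          _ = 10 ^ (nlen (k/10) + 1) := by rw [pow_succ']

theorem nlen_eq_of (k d : Nat) (h1 : 10 ^ d ≤ k) (h2 : k < 10 ^ (d + 1)) : nlen k = d + 1 := by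
  have hk : 1 ≤ k := le_trans (Nat.one_le_pow _ _ (by omega)) h1
  obtain ⟨g1, g2⟩ := nlen_spec k hk
  have hp := nlen_pos k
  by_contra hne
  rcases Nat.lt_or_ge (nlen k) (d + 1) with hlt | hge
  · have : 10 ^ (nlen k) ≤ 10 ^ d := Nat.pow_le_pow_right (by omega) (by omega)
    omega
  · have : 10 ^ (d + 1) ≤ 10 ^ (nlen k - 1) := Nat.pow_le_pow_right (by omega) (by omega)
    omega

theorem nlen_mono (a b : Nat) (h : a ≤ b) : nlen a ≤ nlen b := by
  by_cases ha : 1 ≤ a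
  · obtain ⟨a1, a2⟩ := nlen_spec a ha
    obtain ⟨b1, b2⟩ := nlen_spec b (by omega)
    by_contra hc
    have : 10 ^ (nlen b) ≤ 10 ^ (nlen a - 1) := Nat.pow_le_pow_right (by omega) (by omega)
    omega
  · have : a = 0 := by omega
    subst this
    have h0 : nlen 0 = 1 := by rw [nlen, if_pos (by omega)]
    rw [h0]; exact nlen_pos b

theorem rpu_bounds (m : Nat) (h : 1 ≤ m) : 10 ^ (m - 1) ≤ rpu m ∧ rpu m + 1 ≤ 10 ^ m := by
  induction m with
  | zero => omega
  | succ m ih =>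
    by_cases hm : 1 ≤ m
    · obtain ⟨i1, i2⟩ := ih hm
      rw [rpu]
      constructor
      · calc 10 ^ (m + 1 - 1) = 10 * 10 ^ (m - 1) := by rw [← pow_succ']; congr 1; omega
          _ ≤ 10 * rpu m + 1 := by omega
      · calc 10 * rpu m + 1 + 1 ≤ 10 * (rpu m + 1) := by omega
          _ ≤ 10 * 10 ^ m := by omega
          _ = 10 ^ (m + 1) := by rw [pow_succ']
    · have : m = 0 := by omega
      subst this
      simp [rpu]

theorem nine_rpu (m : Nat) : 9 * rpu m = 10 ^ m - 1 := by
  induction m with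
  | zero => simp [rpu]
  | succ m ih =>
    have : 1 ≤ 10 ^ m := Nat.one_le_pow _ _ (by omega)
    rw [rpu, pow_succ]; omega

theorem lead_le_nlen (k : Nat) : lead k ≤ nlen k := by
  induction k using Nat.strong_induction_on with
  | _ k ih =>
    rw [lead]
    conv_rhs => rw [nlen]
    by_cases h : k < 10
    · rw [if_pos h, if_pos h]; split <;> omega
    · have := ih (k / 10) (by omega)
      rw [if_neg h, if_neg h]
      split <;> omega

theorem div_pow_eq_iff (w m q : Nat) (hw : 0 < w) : m / w = q ↔ q * w ≤ m ∧ m < (q + 1) * w := by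
  constructor
  · rintro rfl
    refine ⟨Nat.div_mul_le_self m w, ?_⟩
    have h1 := Nat.div_add_mod m w
    have h2 := Nat.mod_lt m hw
    calc m = w * (m / w) + m % w := h1.symm
      _ < w * (m / w) + w := by omega
      _ = (m / w + 1) * w := by ring
  · rintro ⟨h1, h2⟩
    exact Nat.div_eq_of_lt_le h1 h2

theorem div_rpu_iff (k : Nat) (hk : 1 ≤ k) : ∀ m, 1 ≤ m → m ≤ nlen k →
    (k / 10 ^ (nlen k - m) = rpu m ↔ m ≤ lead k) := by
  induction k using Nat.strong_induction_on with
  | _ k ih =>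
    intro m hm1 hm2
    by_cases h : k < 10
    · have hn : nlen k = 1 := by rw [nlen, if_pos h]
      have hm : m = 1 := by omega
      subst hm
      rw [hn]
      simp only [Nat.sub_self, pow_zero, Nat.div_one, rpu]
      rw [lead, if_pos h]
      by_cases hk1 : k = 1
      · simp [hk1]
      · rw [if_neg hk1]; omega
    · have hq1 : 1 ≤ k / 10 := by omega
      have hnk : nlen k = nlen (k / 10) + 1 := by rw [nlen]; simp [h]
      set d' := nlen (k / 10) with hd'
      have hlq := lead_le_nlen (k / 10)
      have hlead : lead k = if lead (k / 10) = d' ∧ k % 10 = 1 then d' + 1 else lead (k / 10) := by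
        rw [lead, if_neg h]
      by_cases hmd : m ≤ d'
      · -- reduce to k / 10
        have hdiv : k / 10 ^ (nlen k - m) = (k / 10) / 10 ^ (d' - m) := by
          rw [hnk]
          rw [show d' + 1 - m = (d' - m) + 1 from by omega]
          rw [pow_succ', Nat.div_div_eq_div_mul]
        rw [hdiv, ih (k / 10) (by omega) hq1 m hm1 hmd]
        constructor
        · intro hle
          rw [hlead]; split <;> omega
        · intro hle
          rw [hlead] at hle
          by_cases hc : lead (k / 10) = d' ∧ k % 10 = 1
          · omega
          · rw [if_neg hc] at hle; omega
      · have hm : m = d' + 1 := by omega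
        subst hm
        rw [hnk, Nat.sub_self, pow_zero, Nat.div_one]
        have hk10 : k = 10 * (k / 10) + k % 10 := by omega
        have hrpu : k = rpu (d' + 1) ↔ (k / 10 = rpu d' ∧ k % 10 = 1) := by
          rw [rpu]
          constructor
          · intro he
            have : k % 10 = (10 * rpu d' + 1) % 10 := by rw [he]
            have h10 : (10 * rpu d' + 1) % 10 = 1 := by omega
            omega
          · rintro ⟨h1, h2⟩; omega
        rw [hrpu]
        have hd1 : 1 ≤ d' := nlen_pos (k / 10)
        have hqr : k / 10 = rpu d' ↔ d' ≤ lead (k / 10) := by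
          have := ih (k / 10) (by omega) hq1 d' hd1 (le_refl d')
          rw [← this, Nat.sub_self, pow_zero, Nat.div_one]
        have hlk := lead_le_nlen k
        rw [hnk] at hlk
        constructor
        · rintro ⟨h1, h2⟩
          rw [hlead, if_pos ⟨by omega, h2⟩]
        · intro hle
          rw [hlead] at hle
          by_cases hc : lead (k / 10) = d' ∧ k % 10 = 1
          · exact ⟨hqr.mpr (by omega), hc.2⟩
          · rw [if_neg hc] at hle; omega

-- the interval-count term of B, on the Nat side
def clampN (N m d : Nat) : Nat :=
  if rpu m * 10 ^ (d - m) ≤ N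
  then min (rpu m * 10 ^ (d - m) + 10 ^ (d - m) - 1) N + 1 - rpu m * 10 ^ (d - m)
  else 0

def indN (N m d : Nat) : Nat :=
  if rpu m * 10 ^ (d - m) ≤ N ∧ N < rpu m * 10 ^ (d - m) + 10 ^ (d - m) then 1 else 0

def TT (L N : Nat) : Nat := ∑ m ∈ Finset.Icc 1 L, ∑ d ∈ Finset.Icc m L, clampN N m d

theorem clampN_zero (m d : Nat) (hm : 1 ≤ m) : clampN 0 m d = 0 := by
  have h1 := (rpu_bounds m hm).1
  have h2 : 1 ≤ 10 ^ (m - 1) := Nat.one_le_pow _ _ (by omega)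
  have h3 : 1 ≤ 10 ^ (d - m) := Nat.one_le_pow _ _ (by omega)
  rw [clampN, if_neg (by nlinarith)]

theorem clampN_succ (N m d : Nat) (hm : 1 ≤ m) : clampN (N + 1) m d = clampN N m d + indN (N + 1) m d := by
  have h1 := (rpu_bounds m hm).1
  have h2 : 1 ≤ 10 ^ (m - 1) := Nat.one_le_pow _ _ (by omega)
  have h3 : 1 ≤ 10 ^ (d - m) := Nat.one_le_pow _ _ (by omega)
  have h4 : 1 ≤ rpu m := by omega
  rw [clampN, clampN, indN]
  set w := 10 ^ (d - m)
  set lo := rpu m * w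
  have hlo : 1 ≤ lo := Nat.mul_pos (by omega) (by omega)
  simp only [Nat.min_def]
  split_ifs <;> omega

theorem ind_eq_zero_of_ne (N m d : Nat) (hm : 1 ≤ m) (hmd : m ≤ d) (hN : 1 ≤ N)
    (hne : d ≠ nlen N) : indN N m d = 0 := by
  rw [indN, if_neg]
  rintro ⟨c1, c2⟩
  obtain ⟨r1, r2⟩ := rpu_bounds m hm
  have hw : 1 ≤ 10 ^ (d - m) := Nat.one_le_pow _ _ (by omega)
  have hlow : 10 ^ (d - 1) ≤ rpu m * 10 ^ (d - m) := by
    calc 10 ^ (d - 1) = 10 ^ (m - 1) * 10 ^ (d - m) := by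
          rw [← pow_add]; congr 1; omega
      _ ≤ rpu m * 10 ^ (d - m) := Nat.mul_le_mul_right _ r1
  have hhigh : rpu m * 10 ^ (d - m) + 10 ^ (d - m) ≤ 10 ^ d := by
    calc rpu m * 10 ^ (d - m) + 10 ^ (d - m) = (rpu m + 1) * 10 ^ (d - m) := by ring
      _ ≤ 10 ^ m * 10 ^ (d - m) := Nat.mul_le_mul_right _ r2
      _ = 10 ^ d := by rw [← pow_add]; congr 1; omega
  have hd1 : 1 ≤ d := by omega
  have : nlen N = d := by
    have := nlen_eq_of N (d - 1) (by omega) (by rw [show d - 1 + 1 = d from by omega]; omega)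
    omega
  omega

theorem ind_at_nlen (N m : Nat) (hm : 1 ≤ m) (hN : 1 ≤ N) (hmd : m ≤ nlen N) :
    indN N m (nlen N) = if m ≤ lead N then 1 else 0 := by
  have hw : 0 < 10 ^ (nlen N - m) := Nat.one_le_pow _ _ (by omega)
  have hiff : (rpu m * 10 ^ (nlen N - m) ≤ N ∧ N < rpu m * 10 ^ (nlen N - m) + 10 ^ (nlen N - m))
      ↔ m ≤ lead N := by
    rw [← div_rpu_iff N hN m hm hmd, div_pow_eq_iff _ _ _ hw]
    constructor <;> rintro ⟨a, b⟩ <;> exact ⟨by nlinarith, by nlinarith⟩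
  rw [indN]
  by_cases hc : m ≤ lead N
  · rw [if_pos (hiff.mpr hc), if_pos hc]
  · rw [if_neg (fun hx => hc (hiff.mp hx)), if_neg hc]

theorem sum_icc_le (L : Nat) : ∀ c, c ≤ L →
    (∑ m ∈ Finset.Icc 1 L, if m ≤ c then 1 else 0) = c := by
  induction L with
  | zero =>
    intro c h
    have : c = 0 := by omega
    subst this
    simp
  | succ L ih =>
    intro c h
    rw [Finset.sum_Icc_succ_top (by omega)]
    by_cases hc : c ≤ L
    · rw [ih c hc, if_neg (by omega)]
      omega
    · have htop : (if L + 1 ≤ c then 1 else 0) = 1 := by rw [if_pos (by omega)]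
      have hcongr : (∑ m ∈ Finset.Icc 1 L, if m ≤ c then 1 else 0)
          = ∑ m ∈ Finset.Icc 1 L, if m ≤ L then 1 else 0 := by
        apply Finset.sum_congr rfl
        intro x hx
        simp only [Finset.mem_Icc] at hx
        rw [if_pos (by omega), if_pos (by omega)]
      rw [htop, hcongr, ih L (le_refl _)]
      omega

theorem ind_sum (N L : Nat) (hN : 1 ≤ N) (hL : nlen N ≤ L) :
    ∑ m ∈ Finset.Icc 1 L, ∑ d ∈ Finset.Icc m L, indN N m d = lead N := by
  have hstep : ∀ m ∈ Finset.Icc 1 L,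
      ∑ d ∈ Finset.Icc m L, indN N m d = if m ≤ lead N then 1 else 0 := by
    intro m hm
    simp only [Finset.mem_Icc] at hm
    by_cases hmd : m ≤ nlen N
    · rw [Finset.sum_eq_single (nlen N)]
      · exact ind_at_nlen N m hm.1 hN hmd
      · intro d hd hne
        simp only [Finset.mem_Icc] at hd
        exact ind_eq_zero_of_ne N m d hm.1 hd.1 hN hne
      · intro habs
        simp only [Finset.mem_Icc] at habs
        omega
    · have hall : ∀ d ∈ Finset.Icc m L, indN N m d = 0 := by
        intro d hd
        simp only [Finset.mem_Icc] at hd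
        exact ind_eq_zero_of_ne N m d hm.1 hd.1 hN (by omega)
      rw [Finset.sum_congr rfl hall, Finset.sum_const, smul_eq_mul, Nat.mul_zero]
      rw [if_neg (by have := lead_le_nlen N; omega)]
  rw [Finset.sum_congr rfl hstep]
  exact sum_icc_le L (lead N) (by have := lead_le_nlen N; omega)

theorem S_eq_T (N L : Nat) (hL : nlen N ≤ L) :
    ∑ k ∈ Finset.range N, lead (k + 1) = TT L N := by
  induction N with
  | zero =>
    rw [Finset.sum_range_zero, TT]
    symm
    apply Finset.sum_eq_zero
    intro m hm
    apply Finset.sum_eq_zero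
    intro d hd
    simp only [Finset.mem_Icc] at hm
    exact clampN_zero m d hm.1
  | succ N ih =>
    have hmono : nlen N ≤ L := le_trans (nlen_mono N (N + 1) (by omega)) hL
    rw [Finset.sum_range_succ, ih hmono, TT, TT]
    have : ∀ m ∈ Finset.Icc 1 L, ∑ d ∈ Finset.Icc m L, clampN (N + 1) m d
        = (∑ d ∈ Finset.Icc m L, clampN N m d) + ∑ d ∈ Finset.Icc m L, indN (N + 1) m d := by
      intro m hm
      simp only [Finset.mem_Icc] at hm
      rw [← Finset.sum_add_distrib]
      exact Finset.sum_congr rfl (fun d _ => clampN_succ N m d hm.1)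
    rw [Finset.sum_congr rfl this, Finset.sum_add_distrib]
    rw [ind_sum (N + 1) L (by omega) hL]

-- ===== bridging the ports =====

theorem altLen_eq (N : Nat) : ∀ t : Int, t = (N : Int) → 1 ≤ t → altLen t = (nlen N : Int) := by
  induction N using Nat.strong_induction_on with
  | _ N ih =>
    intro t ht h1
    subst ht
    rw [altLen, dif_pos (by omega)]
    have hfd : PySem.Int.floordiv (N : Int) 10 = (N : Int) / 10 :=
      PySem.Int.floordiv_eq_ediv_of_pos (by omega)
    have hdiv : ((N : Int)) / 10 = ((N / 10 : Nat) : Int) := (Int.natCast_ediv N 10).symm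
    by_cases h10 : N < 10
    · have hz : N / 10 = 0 := by omega
      rw [hfd, hdiv, hz]
      rw [show altLen (((0 : Nat) : Int)) = 0 from by rw [altLen]; norm_num]
      rw [nlen, if_pos h10]
      norm_num
    · rw [hfd, hdiv, ih (N / 10) (by omega) _ rfl (by exact_mod_cast (by omega : 1 ≤ N / 10))]
      conv_rhs => rw [nlen]
      rw [if_neg h10]
      push_cast
      ring

theorem sum_Icc_shift (f : Nat → Nat) (m L : Nat) :
    ∑ d ∈ Finset.Icc m L, f d = ∑ j ∈ Finset.range (L + 1 - m), f (m + j) := by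
  rw [← Finset.Ico_add_one_right_eq_Icc, Finset.sum_Ico_eq_sum_range]

theorem A_eq (n : Int) (h : 1 ≤ n) :
    compute_bruteforce n = ((∑ k ∈ Finset.range n.toNat, lead (k + 1) : Nat) : Int) := by
  rw [compute_bruteforce, PySem.List.foldl_add, PySem.List.pyRange_one, List.map_map]
  rw [show n + 1 - 1 = n from by ring]
  have hfun : ((fun k => pyCntOnes (PySem.Int.toChars k)) ∘ fun (k : Nat) => 1 + (k : Int))
      = fun (k : Nat) => ((lead (k + 1) : Nat) : Int) := by
    funext k
    simp only [Function.comp]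
    rw [toChars_nonneg _ (by omega), pyCntOnes_eq, cntN_digs]
    congr 2
    omega
  rw [hfun, zero_add]
  rw [show (fun (k : Nat) => ((lead (k + 1) : Nat) : Int)) = fun (k : Nat) => (Nat.cast ∘ fun k => lead (k + 1)) k from rfl]
  rw [← List.map_map, ← Nat.cast_list_sum]
  rfl

theorem rep_cast (i : Nat) : PySem.Int.floordiv ((10 : Int) ^ (i + 1) - 1) 9 = (rpu (i + 1) : Int) := by
  have hpow : (1 : Nat) ≤ 10 ^ (i + 1) := Nat.one_le_pow _ _ (by omega)
  have h9 := nine_rpu (i + 1)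
  have hdiv : (10 ^ (i + 1) - 1) / 9 = rpu (i + 1) := by
    rw [← h9]; exact Nat.mul_div_cancel_left _ (by omega)
  rw [PySem.Int.floordiv_eq_ediv_of_pos (by omega)]
  rw [show ((10 : Int) ^ (i + 1) - 1) = ((10 ^ (i + 1) - 1 : Nat) : Int) from by
    rw [Nat.cast_sub hpow]; push_cast; ring]
  rw [show (9 : Int) = ((9 : Nat) : Int) from rfl, ← Int.natCast_ediv, hdiv]

theorem term_cast (N m d : Nat) (hm : 1 ≤ m) :
    (if (rpu m : Int) * 10 ^ (d - m) ≤ (N : Int)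
     then min ((rpu m : Int) * 10 ^ (d - m) + 10 ^ (d - m) - 1) (N : Int)
          - (rpu m : Int) * 10 ^ (d - m) + 1
     else 0) = (clampN N m d : Int) := by
  have hw : 1 ≤ 10 ^ (d - m) := Nat.one_le_pow _ _ (by omega)
  have hr1 := (rpu_bounds m hm).1
  have hr2 : 1 ≤ 10 ^ (m - 1) := Nat.one_le_pow _ _ (by omega)
  have hr : 1 ≤ rpu m := by omega
  rw [clampN]
  rw [show ((rpu m : Int) * 10 ^ (d - m)) = ((rpu m * 10 ^ (d - m) : Nat) : Int) from by
    push_cast; ring]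
  rw [show ((10 : Int) ^ (d - m)) = ((10 ^ (d - m) : Nat) : Int) from by push_cast; ring]
  by_cases hc : rpu m * 10 ^ (d - m) ≤ N
  · rw [if_pos (by exact_mod_cast hc), if_pos hc]
    generalize rpu m * 10 ^ (d - m) = A at *
    generalize 10 ^ (d - m) = W at *
    omega
  · rw [if_neg (by exact_mod_cast hc), if_neg hc]
    simp

theorem TT_reindex (L N : Nat) : TT L N
    = ∑ i ∈ Finset.range L, ∑ j ∈ Finset.range (L - i), clampN N (i + 1) (i + 1 + j) := by
  rw [TT, sum_Icc_shift _ 1 L, show L + 1 - 1 = L from by omega]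
  apply Finset.sum_congr rfl
  intro i _
  rw [sum_Icc_shift _ (1 + i) L, show L + 1 - (1 + i) = L - i from by omega]
  apply Finset.sum_congr rfl
  intro j _
  congr 1 <;> omega

theorem B_eq (n : Int) (h : 1 ≤ n) :
    compute_bruteforce_alt n = ((TT (nlen n.toNat) n.toNat : Nat) : Int) := by
  have hn : n = ((n.toNat : Nat) : Int) := by omega
  rw [compute_bruteforce_alt, if_neg (by omega)]
  simp only [altLen_eq n.toNat n hn (by omega)]
  set N := n.toNat with hN
  set L := nlen N with hL
  rw [hn]
  have h1 : (PySem.List.pyRange 1 ((L : Int) + 1) 1).foldl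
      (fun total m =>
        (PySem.List.pyRange m ((L : Int) + 1) 1).foldl
          (fun total d =>
            if PySem.Int.floordiv (10 ^ m.toNat - 1) 9 * 10 ^ (d - m).toNat ≤ ((N : Nat) : Int) then
              total +
                (min (PySem.Int.floordiv (10 ^ m.toNat - 1) 9 * 10 ^ (d - m).toNat + 10 ^ (d - m).toNat - 1)
                     ((N : Nat) : Int) -
                   PySem.Int.floordiv (10 ^ m.toNat - 1) 9 * 10 ^ (d - m).toNat + 1)
            else total)
          total)
      0
    = 0 + ((PySem.List.pyRange 1 ((L : Int) + 1) 1).map (fun m =>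
        ((PySem.List.pyRange m ((L : Int) + 1) 1).map (fun d =>
          if PySem.Int.floordiv (10 ^ m.toNat - 1) 9 * 10 ^ (d - m).toNat ≤ ((N : Nat) : Int) then
            min (PySem.Int.floordiv (10 ^ m.toNat - 1) 9 * 10 ^ (d - m).toNat + 10 ^ (d - m).toNat - 1)
                ((N : Nat) : Int) -
              PySem.Int.floordiv (10 ^ m.toNat - 1) 9 * 10 ^ (d - m).toNat + 1
          else 0)).sum)).sum := by
    rw [PySem.List.foldl_congr_mem _ _ (fun (total m : Int) => total +
        ((PySem.List.pyRange m ((L : Int) + 1) 1).map (fun d =>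
          if PySem.Int.floordiv (10 ^ m.toNat - 1) 9 * 10 ^ (d - m).toNat ≤ ((N : Nat) : Int) then
            min (PySem.Int.floordiv (10 ^ m.toNat - 1) 9 * 10 ^ (d - m).toNat + 10 ^ (d - m).toNat - 1)
                ((N : Nat) : Int) -
              PySem.Int.floordiv (10 ^ m.toNat - 1) 9 * 10 ^ (d - m).toNat + 1
          else 0)).sum) 0 ?_]
    · exact PySem.List.foldl_add _ _ 0
    · intro acc m _
      rw [PySem.List.foldl_congr_mem _ _ (fun (total d : Int) => total +
          (if PySem.Int.floordiv (10 ^ m.toNat - 1) 9 * 10 ^ (d - m).toNat ≤ ((N : Nat) : Int) then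
            min (PySem.Int.floordiv (10 ^ m.toNat - 1) 9 * 10 ^ (d - m).toNat + 10 ^ (d - m).toNat - 1)
                ((N : Nat) : Int) -
              PySem.Int.floordiv (10 ^ m.toNat - 1) 9 * 10 ^ (d - m).toNat + 1
          else 0)) acc ?_]
      · exact PySem.List.foldl_add _ _ acc
      · intro acc2 d _
        dsimp only
        by_cases hc : PySem.Int.floordiv (10 ^ m.toNat - 1) 9 * 10 ^ (d - m).toNat ≤ ((N : Nat) : Int)
        · rw [if_pos hc, if_pos hc]
        · rw [if_neg hc, if_neg hc]; ring
  rw [h1, zero_add, PySem.List.pyRange_one,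
    show (L : Int) + 1 - 1 = (L : Int) from by ring, Int.toNat_natCast, List.map_map]
  have hGi : ((fun m =>
        ((PySem.List.pyRange m ((L : Int) + 1) 1).map (fun d =>
          if PySem.Int.floordiv (10 ^ m.toNat - 1) 9 * 10 ^ (d - m).toNat ≤ ((N : Nat) : Int) then
            min (PySem.Int.floordiv (10 ^ m.toNat - 1) 9 * 10 ^ (d - m).toNat + 10 ^ (d - m).toNat - 1)
                ((N : Nat) : Int) -
              PySem.Int.floordiv (10 ^ m.toNat - 1) 9 * 10 ^ (d - m).toNat + 1
          else 0)).sum) ∘ fun (k : Nat) => (1 : Int) + (k : Int))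
      = fun (i : Nat) => ((∑ j ∈ Finset.range (L - i), clampN N (i + 1) (i + 1 + j) : Nat) : Int) := by
    funext i
    simp only [Function.comp]
    rw [PySem.List.pyRange_one, show ((L : Int) + 1 - (1 + (i : Int))).toNat = L - i from by omega,
      List.map_map]
    have hfun : ((fun d =>
          if PySem.Int.floordiv (10 ^ (1 + (i : Int)).toNat - 1) 9 * 10 ^ (d - (1 + (i : Int))).toNat ≤ ((N : Nat) : Int) then
            min (PySem.Int.floordiv (10 ^ (1 + (i : Int)).toNat - 1) 9 * 10 ^ (d - (1 + (i : Int))).toNat + 10 ^ (d - (1 + (i : Int))).toNat - 1)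
                ((N : Nat) : Int) -
              PySem.Int.floordiv (10 ^ (1 + (i : Int)).toNat - 1) 9 * 10 ^ (d - (1 + (i : Int))).toNat + 1
          else 0) ∘ fun (j : Nat) => (1 + (i : Int)) + (j : Int))
        = fun (j : Nat) => ((clampN N (i + 1) (i + 1 + j) : Nat) : Int) := by
      funext j
      simp only [Function.comp]
      rw [show ((1 : Int) + (i : Int)).toNat = i + 1 from by omega,
        show ((1 + (i : Int) + (j : Int)) - (1 + (i : Int))).toNat = j from by omega,
        rep_cast i]
      have ht := term_cast N (i + 1) (i + 1 + j) (by omega)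
      rw [show i + 1 + j - (i + 1) = j from by omega] at ht
      exact ht
    rw [hfun]
    rw [show (fun (j : Nat) => ((clampN N (i + 1) (i + 1 + j) : Nat) : Int))
        = Nat.cast ∘ (fun j => clampN N (i + 1) (i + 1 + j)) from rfl,
      ← List.map_map, ← Nat.cast_list_sum]
    rfl
  rw [hGi]
  rw [show (fun (i : Nat) => ((∑ j ∈ Finset.range (L - i), clampN N (i + 1) (i + 1 + j) : Nat) : Int))
      = Nat.cast ∘ (fun i => ∑ j ∈ Finset.range (L - i), clampN N (i + 1) (i + 1 + j)) from rfl,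
    ← List.map_map, ← Nat.cast_list_sum]
  rw [TT_reindex]
  rfl

-- ===== VERDICT =====
theorem compute_bruteforce_spec : Claim_equal_compute_bruteforce := by
  intro n _
  unfold Spec_compute_bruteforce
  by_cases h : 1 ≤ n
  · rw [A_eq n h, B_eq n h, S_eq_T n.toNat (nlen n.toNat) (le_refl _)]
  · rw [compute_bruteforce, compute_bruteforce_alt]
    rw [PySem.List.pyRange_one_eq_nil (by omega), if_pos (by omega)]
    rfl
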